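-- pv_equiv track=rewrite | github.com/Kongkiat44/CE66-26_Code-Line_Chat_Bot_Content_Management_System | Model Server/Worker/model.py | clusterRelation
-- ===== SOURCE A (Python) =====
-- def clusterRelation(inserted_cluster_id, img_face_count, predicted_cluster):
--     # Define variebles
--     img_clusters = {} # Map each image and cluster ex. {'img1': [0, 1, 2], 'img2': [1, 3], 'img3': []}
--     relations_cluster = {} # Relation of each cluster ex.
--     # {
--     #   'cluster1': {
--     #       'cluster2': 8
--     #       'cluster3': 0
--     #       'cluster4': 2
--     #   }
--     #   'cluster2': {
--     #       'cluster1': 8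
--     #       'cluster3': 11
--     #       'cluster4': 4
--     #   }
--     # }
--     cluster_count = {} # Count each cluster image ex. {'cluster1': 5, 'cluster2': 8}
--
--     # Prepare relation cluster and cluster count dict
--     for cluster_id in inserted_cluster_id:
--         relations_cluster[str(cluster_id)] = {}
--         for relate_cluster_id in inserted_cluster_id:
--             if cluster_id != relate_cluster_id:
--                 relations_cluster[str(cluster_id)][str(relate_cluster_id)] = 0
--         cluster_count[str(cluster_id)] = 0
--
--     # Create images cluster list and relation cluster
--     count = 0 # Use to track face image
--     for key, value in img_face_count.items():
--         img_cluster_list = []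
--         for i in range(value):
--             current_cluster_id = predicted_cluster[count]
--             # If not a noise
--             if current_cluster_id != -1:
--                 # If not in list
--                 if current_cluster_id not in img_cluster_list:
--                     cluster_count[str(current_cluster_id)] += 1
--                     # If list is not empty
--                     if len(img_cluster_list) > 0:
--                         # Count relation
--                         for cluster_id in img_cluster_list:
--                             relations_cluster[str(cluster_id)][str(current_cluster_id)] += 1
--                             relations_cluster[str(current_cluster_id)][str(cluster_id)] += 1
--                     # Add cluster id to list
--                     img_cluster_list.append(current_cluster_id)
--             count += 1
--         img_clusters[key] = img_cluster_list
--     return img_clusters, relations_cluster, cluster_count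
-- ===== SOURCE B (Python) =====
-- def clusterRelation(inserted_cluster_id, img_face_count, predicted_cluster):
--     # Dense zero-initialised relation matrix and per-cluster counters.
--     relations_cluster = {str(c): {str(d): 0 for d in inserted_cluster_id if d != c}
--                          for c in inserted_cluster_id}
--     cluster_count = {str(c): 0 for c in inserted_cluster_id}
--
--     # Pass 1: slice the predicted labels per image with a running offset and
--     # build each image's ordered distinct non-noise cluster list.
--     img_clusters = {}
--     offset = 0
--     for key, value in img_face_count.items():
--         n = max(value, 0)
--         faces = predicted_cluster[offset:offset + n]
--         offset += n
--         seen = []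
--         for c in faces:
--             if c != -1 and c not in seen:
--                 cluster_count[str(c)] += 1
--                 seen.append(c)
--         img_clusters[key] = seen
--
--     # Pass 2: count co-occurrence for every pair inside each image's list.
--     for seen in img_clusters.values():
--         for j, c in enumerate(seen):
--             b = str(c)
--             for a in seen[:j]:
--                 sa = str(a)
--                 relations_cluster[sa][b] += 1
--                 relations_cluster[b][sa] += 1
--
--     return img_clusters, relations_cluster, cluster_count
-- ===== Notes on version B (the rewrite author's own statement) =====
-- stated objective: simpler
-- what changed: A single interleaved pass with a manually tracked face index and relation counting nested inside the dedup loop is decomposed into comprehension-style initialisation plus two passes: pass 1 slices predicted_cluster per image with a running offset and builds the distinct-cluster lists and cluster counts, pass 2 walks each finished list with enumerate/prefix slices to count co-occurrence pairs; Pre_ additionally notes that img_face_count is a Python dict, so its keys are distinct by construction.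
import Mathlib
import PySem

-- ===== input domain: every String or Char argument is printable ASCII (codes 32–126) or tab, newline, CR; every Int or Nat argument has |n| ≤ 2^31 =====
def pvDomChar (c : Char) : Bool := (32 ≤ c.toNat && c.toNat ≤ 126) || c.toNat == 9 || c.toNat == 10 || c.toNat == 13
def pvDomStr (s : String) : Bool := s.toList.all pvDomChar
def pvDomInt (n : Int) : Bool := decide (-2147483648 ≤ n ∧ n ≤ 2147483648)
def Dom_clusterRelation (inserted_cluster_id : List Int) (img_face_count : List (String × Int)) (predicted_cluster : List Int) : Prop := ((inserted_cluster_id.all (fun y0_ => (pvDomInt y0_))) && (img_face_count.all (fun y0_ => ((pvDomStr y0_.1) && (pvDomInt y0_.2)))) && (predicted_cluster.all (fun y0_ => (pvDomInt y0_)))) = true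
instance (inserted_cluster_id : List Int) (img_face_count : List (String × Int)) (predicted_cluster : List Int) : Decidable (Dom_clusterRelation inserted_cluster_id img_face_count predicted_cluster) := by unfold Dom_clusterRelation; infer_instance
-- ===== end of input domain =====

-- B replaces A's single interleaved pass (manual face index, relation counting nested in the
-- dedup loop) by comprehension-style initialisation plus two passes: slice-based per-image
-- dedup/count, then pair counting over each finished list (objective: simpler decomposition).

abbrev CntD := PySem.Dict String Int
abbrev RelD := PySem.Dict String (PySem.Dict String Int)
abbrev ImgD := PySem.Dict String (List Int)

-- ===== PORT A =====
-- `relations[str(x)][str(c)] += 1; relations[str(c)][str(x)] += 1`: outer/inner dict updates;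
-- the `modify` defaults are never reached on inputs admitted by Pre_ (Python raises KeyError there).
def bumpA (rel : RelD) (x c : Int) : RelD :=
  let rel := rel.modify (PySem.Int.toStr x) PySem.Dict.empty (fun d => d.modify (PySem.Int.toStr c) 0 (· + 1))
  rel.modify (PySem.Int.toStr c) PySem.Dict.empty (fun d => d.modify (PySem.Int.toStr x) 0 (· + 1))

-- one iteration of A's preparation loop: `relations[str(cid)] = {}`, the inner zero-filling
-- loop (`relations[str(cid)][str(rcid)] = 0`), then `cluster_count[str(cid)] = 0`
def initStepA (ins : List Int) (st : RelD × CntD) (cid : Int) : RelD × CntD :=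
  let rel := st.1.insert (PySem.Int.toStr cid) PySem.Dict.empty
  let rel := ins.foldl (fun r rcid =>
      if cid ≠ rcid then
        r.modify (PySem.Int.toStr cid) PySem.Dict.empty (fun d => d.insert (PySem.Int.toStr rcid) 0)
      else r) rel
  (rel, st.2.insert (PySem.Int.toStr cid) 0)

-- one iteration of `for i in range(value)`: state (img_cluster_list, count, relations, cluster_count);
-- `predicted_cluster[count]` is pyGetD (exact inside Pre_, where the index is always in range)
def faceStepA (pc : List Int) (s : List Int × Int × RelD × CntD) (_i : Int) :
    List Int × Int × RelD × CntD :=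
  let c := PySem.List.pyGetD pc s.2.1 0
  if c ≠ -1 then
    if c ∉ s.1 then
      let cnt := s.2.2.2.modify (PySem.Int.toStr c) 0 (· + 1)
      let rel := if s.1.length > 0 then s.1.foldl (fun r x => bumpA r x c) s.2.2.1 else s.2.2.1
      (s.1 ++ [c], s.2.1 + 1, rel, cnt)
    else (s.1, s.2.1 + 1, s.2.2.1, s.2.2.2)
  else (s.1, s.2.1 + 1, s.2.2.1, s.2.2.2)

-- one iteration of `for key, value in img_face_count.items()`: state (count, img_clusters, relations, cluster_count)
def imgStepA (pc : List Int) (s : Int × ImgD × RelD × CntD) (kv : String × Int) :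
    Int × ImgD × RelD × CntD :=
  let r := (PySem.List.pyRange 0 kv.2 1).foldl (faceStepA pc) ([], s.1, s.2.2.1, s.2.2.2)
  (r.2.1, s.2.1.insert kv.1 r.1, r.2.2.1, r.2.2.2)

def clusterRelation (inserted_cluster_id : List Int) (img_face_count : List (String × Int)) (predicted_cluster : List Int) : (List (String × List Int)) × (List (String × List (String × Int))) × (List (String × Int)) :=
  let init := inserted_cluster_id.foldl (initStepA inserted_cluster_id) (PySem.Dict.empty, PySem.Dict.empty)
  let fin := img_face_count.foldl (imgStepA predicted_cluster) (0, PySem.Dict.empty, init.1, init.2)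
  (fin.2.1.items, fin.2.2.1.items.map (fun p => (p.1, p.2.items)), fin.2.2.2.items)

-- ===== PORT B =====
-- `{str(c): {str(d): 0 for d in inserted_cluster_id if d != c} for c in inserted_cluster_id}`
def initRelB (ins : List Int) : RelD :=
  ins.foldl (fun r c =>
    r.insert (PySem.Int.toStr c)
      (ins.foldl (fun d x => if x ≠ c then d.insert (PySem.Int.toStr x) 0 else d) PySem.Dict.empty))
    PySem.Dict.empty

-- `{str(c): 0 for c in inserted_cluster_id}`
def initCntB (ins : List Int) : CntD :=
  ins.foldl (fun d c => d.insert (PySem.Int.toStr c) 0) PySem.Dict.empty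

-- body of `for c in faces: if c != -1 and c not in seen: ...`; state (cluster_count, seen)
def dedupStepB (s : CntD × List Int) (c : Int) : CntD × List Int :=
  if c ≠ -1 ∧ c ∉ s.2 then (s.1.modify (PySem.Int.toStr c) 0 (· + 1), s.2 ++ [c]) else s

-- pass 1, one image: slice the faces at the running offset, dedupe, store; state (offset, img_clusters, cluster_count)
def imgStepB (pc : List Int) (s : Int × ImgD × CntD) (kv : String × Int) : Int × ImgD × CntD :=
  let n := max kv.2 0
  let faces := PySem.List.slice pc (some s.1) (some (s.1 + n))
  let r := faces.foldl dedupStepB (s.2.2, [])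
  (s.1 + n, s.2.1.insert kv.1 r.2, r.1)

-- pass 2, one image: `for j, c in enumerate(seen): b = str(c); for a in seen[:j]: ...`
def imgRelB (rel : RelD) (seen : List Int) : RelD :=
  (PySem.List.enumerate seen 0).foldl (fun r jc =>
    let b := PySem.Int.toStr jc.2
    (PySem.List.slice seen (some 0) (some jc.1)).foldl (fun r a =>
      let sa := PySem.Int.toStr a
      let r := r.modify sa PySem.Dict.empty (fun d => d.modify b 0 (· + 1))
      r.modify b PySem.Dict.empty (fun d => d.modify sa 0 (· + 1))) r) rel

def clusterRelation_alt (inserted_cluster_id : List Int) (img_face_count : List (String × Int)) (predicted_cluster : List Int) : (List (String × List Int)) × (List (String × List (String × Int))) × (List (String × Int)) :=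
  let rel0 := initRelB inserted_cluster_id
  let cnt0 := initCntB inserted_cluster_id
  let p1 := img_face_count.foldl (imgStepB predicted_cluster) (0, PySem.Dict.empty, cnt0)
  let rel := p1.2.1.values.foldl imgRelB rel0
  (p1.2.1.items, rel.items.map (fun p => (p.1, p.2.items)), p1.2.2.items)

-- ===== PRECONDITION & SPEC =====
-- total number of faces Python A walks over: sum over images of max(value, 0)
def totalFaces (ifc : List (String × Int)) : Int := ifc.foldl (fun s kv => s + max kv.2 0) 0

-- Pre_ = the inputs where Python A returns normally: enough predicted labels for all faces
-- (else IndexError) and every consumed non-noise label present in inserted_cluster_id (else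
-- KeyError).  The Nodup clause is no narrowing at the Python level: img_face_count is a Python
-- dict, whose keys are distinct by construction.
def Pre_clusterRelation (inserted_cluster_id : List Int) (img_face_count : List (String × Int)) (predicted_cluster : List Int) : Prop :=
  (img_face_count.map Prod.fst).Nodup ∧
  totalFaces img_face_count ≤ (predicted_cluster.length : Int) ∧
  ∀ c ∈ predicted_cluster.take (totalFaces img_face_count).toNat, c = -1 ∨ c ∈ inserted_cluster_id

instance (inserted_cluster_id : List Int) (img_face_count : List (String × Int)) (predicted_cluster : List Int) : Decidable (Pre_clusterRelation inserted_cluster_id img_face_count predicted_cluster) := by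
  unfold Pre_clusterRelation; infer_instance

def pvWitness_clusterRelation : List Int × (List (String × Int)) × List Int :=
  ([0, 1], [("img1", 2), ("img2", 1)], [0, 1, 0])

def Spec_clusterRelation (inserted_cluster_id : List Int) (img_face_count : List (String × Int)) (predicted_cluster : List Int) (out : (List (String × List Int)) × (List (String × List (String × Int))) × (List (String × Int))) : Prop := out = clusterRelation_alt inserted_cluster_id img_face_count predicted_cluster
instance (inserted_cluster_id : List Int) (img_face_count : List (String × Int)) (predicted_cluster : List Int) (out : (List (String × List Int)) × (List (String × List (String × Int))) × (List (String × Int))) : Decidable (Spec_clusterRelation inserted_cluster_id img_face_count predicted_cluster out) := by unfold Spec_clusterRelation; infer_instance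

-- ===== CLAIM (what is proved, stated in full; the proofs are below) =====
def Claim_equal_clusterRelation : Prop := ∀ (inserted_cluster_id : List Int) (img_face_count : List (String × Int)) (predicted_cluster : List Int), Dom_clusterRelation inserted_cluster_id img_face_count predicted_cluster → Pre_clusterRelation inserted_cluster_id img_face_count predicted_cluster → Spec_clusterRelation inserted_cluster_id img_face_count predicted_cluster (clusterRelation inserted_cluster_id img_face_count predicted_cluster)

-- ===== LEMMAS AND PROOFS =====

-- A's relation updates of one image, replayed over the final distinct list: `pre` is the part
-- already in img_cluster_list, the next element is bumped against all of `pre`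
def replayRel : RelD → List Int → List Int → RelD
  | rel, _, [] => rel
  | rel, pre, c :: t => replayRel (pre.foldl (fun r x => bumpA r x c) rel) (pre ++ [c]) t

-- the distinct non-noise clusters of a face list, appended after `pre`
def dedupList (pre : List Int) (faces : List Int) : List Int :=
  faces.foldl (fun s c => if c ≠ -1 ∧ c ∉ s then s ++ [c] else s) pre

-- joint spec of A's inner face loop (list, relations, counts), indexing replaced by the face list
def dSpec : List Int × RelD × CntD → List Int → List Int × RelD × CntD
  | s, [] => s
  | s, c :: t =>
    if c ≠ -1 ∧ c ∉ s.1 then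
      dSpec (s.1 ++ [c], s.1.foldl (fun r x => bumpA r x c) s.2.1,
             s.2.2.modify (PySem.Int.toStr c) 0 (· + 1)) t
    else dSpec s t

-- the per-image distinct lists, images taken in order with a running face offset
def seensList (pc : List Int) : Int → List (String × Int) → List (List Int)
  | _, [] => []
  | count, kv :: t =>
      dedupList [] ((pc.drop count.toNat).take kv.2.toNat) :: seensList pc (count + max kv.2 0) t

theorem totalFaces_shift (l : List (String × Int)) : ∀ a : Int,
    l.foldl (fun s kv => s + max kv.2 0) a = a + totalFaces l := by
  induction l with
  | nil => intro a; simp [totalFaces]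
  | cons kv t ih =>
    intro a
    have h1 : totalFaces (kv :: t) = (0 + max kv.2 0) + totalFaces t := by
      show List.foldl _ 0 (kv :: t) = _
      rw [List.foldl_cons, ih]
    rw [List.foldl_cons, ih, h1]
    ring

theorem totalFaces_cons (kv : String × Int) (t : List (String × Int)) :
    totalFaces (kv :: t) = max kv.2 0 + totalFaces t := by
  have h1 : totalFaces (kv :: t) = (0 + max kv.2 0) + totalFaces t := by
    show List.foldl _ 0 (kv :: t) = _
    rw [List.foldl_cons, totalFaces_shift]
  rw [h1]
  ring

theorem totalFaces_nonneg (l : List (String × Int)) : 0 ≤ totalFaces l := by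
  induction l with
  | nil => simp [totalFaces]
  | cons kv t ih => rw [totalFaces_cons]; have := le_max_right kv.2 (0:Int); omega

-- A's inner zero-filling loop updates only the freshly inserted row
theorem initA_inner (cid : Int) (l : List Int) :
    ∀ (r : RelD) (d : PySem.Dict String Int),
      l.foldl (fun r rcid =>
          if cid ≠ rcid then
            r.modify (PySem.Int.toStr cid) PySem.Dict.empty (fun d => d.insert (PySem.Int.toStr rcid) 0)
          else r) (r.insert (PySem.Int.toStr cid) d)
      = r.insert (PySem.Int.toStr cid)
          (l.foldl (fun d rcid => if cid ≠ rcid then d.insert (PySem.Int.toStr rcid) 0 else d) d) := by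
  induction l with
  | nil => intro r d; rfl
  | cons a t ih =>
    intro r d
    rw [List.foldl_cons, List.foldl_cons]
    by_cases h : cid ≠ a
    · rw [if_pos h, if_pos h]
      have hstep : (r.insert (PySem.Int.toStr cid) d).modify (PySem.Int.toStr cid) PySem.Dict.empty
            (fun d => d.insert (PySem.Int.toStr a) 0)
          = r.insert (PySem.Int.toStr cid) (d.insert (PySem.Int.toStr a) 0) := by
        rw [PySem.Dict.modify, PySem.Dict.getD_insert_self, PySem.Dict.insert_insert_self]
      rw [hstep, ih]
    · rw [if_neg h, if_neg h, ih]

theorem init_split (ins : List Int) (l : List Int) :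
    ∀ (r : RelD) (c : CntD),
      l.foldl (initStepA ins) (r, c)
        = (l.foldl (fun r cid =>
              r.insert (PySem.Int.toStr cid)
                (ins.foldl (fun d rcid => if cid ≠ rcid then d.insert (PySem.Int.toStr rcid) 0 else d)
                  PySem.Dict.empty)) r,
           l.foldl (fun c cid => c.insert (PySem.Int.toStr cid) 0) c) := by
  induction l with
  | nil => intro r c; rfl
  | cons cid t ih =>
    intro r c
    rw [List.foldl_cons, List.foldl_cons, List.foldl_cons]
    have hstep : initStepA ins (r, c) cid
        = (r.insert (PySem.Int.toStr cid)
             (ins.foldl (fun d rcid => if cid ≠ rcid then d.insert (PySem.Int.toStr rcid) 0 else d)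
               PySem.Dict.empty),
           c.insert (PySem.Int.toStr cid) 0) := by
      simp only [initStepA]
      rw [initA_inner]
    rw [hstep, ih]

theorem initEq (ins : List Int) :
    ins.foldl (initStepA ins) (PySem.Dict.empty, PySem.Dict.empty) = (initRelB ins, initCntB ins) := by
  rw [init_split]
  unfold initRelB initCntB
  refine congrArg₂ Prod.mk ?_ rfl
  refine congrArg (fun f => List.foldl f PySem.Dict.empty ins) ?_
  funext r c
  refine congrArg _ ?_
  refine congrArg (fun f => List.foldl f PySem.Dict.empty ins) ?_
  funext d x
  exact if_congr ⟨Ne.symm, Ne.symm⟩ rfl rfl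

-- A's inner face loop = dSpec on the corresponding slice of predicted_cluster
theorem faceFold (pc : List Int) (l : List Int) :
    ∀ (count : Int) (lst : List Int) (rel : RelD) (cnt : CntD),
      0 ≤ count → count.toNat + l.length ≤ pc.length →
      l.foldl (faceStepA pc) (lst, count, rel, cnt)
        = ((dSpec (lst, rel, cnt) ((pc.drop count.toNat).take l.length)).1,
           count + l.length,
           (dSpec (lst, rel, cnt) ((pc.drop count.toNat).take l.length)).2.1,
           (dSpec (lst, rel, cnt) ((pc.drop count.toNat).take l.length)).2.2) := by
  induction l with
  | nil => intro count lst rel cnt h0 _; simp [dSpec]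
  | cons i t ih =>
    intro count lst rel cnt h0 hlen
    have hlt : count.toNat < pc.length := by simp at hlen; omega
    have hget : PySem.List.pyGetD pc count 0 = pc[count.toNat] := by
      conv_lhs => rw [show count = ((count.toNat : Nat) : Int) from (Int.toNat_of_nonneg h0).symm]
      rw [PySem.List.pyGetD_natCast]
      exact List.getD_eq_getElem pc 0 hlt
    have hdrop : pc.drop count.toNat = pc[count.toNat] :: pc.drop (count.toNat + 1) :=
      List.drop_eq_getElem_cons hlt
    have htn : (count + 1).toNat = count.toNat + 1 := by omega
    have hlen' : (count + 1).toNat + t.length ≤ pc.length := by simp at hlen ⊢; omega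
    have hstep : ∀ lst' rel' cnt',
        t.foldl (faceStepA pc) (lst', count + 1, rel', cnt')
          = ((dSpec (lst', rel', cnt') ((pc.drop (count.toNat + 1)).take t.length)).1,
             count + 1 + t.length,
             (dSpec (lst', rel', cnt') ((pc.drop (count.toNat + 1)).take t.length)).2.1,
             (dSpec (lst', rel', cnt') ((pc.drop (count.toNat + 1)).take t.length)).2.2) := by
      intro lst' rel' cnt'
      rw [ih (count + 1) lst' rel' cnt' (by omega) hlen', htn]
    have hface : (pc.drop count.toNat).take (i :: t).length
        = pc[count.toNat] :: (pc.drop (count.toNat + 1)).take t.length := by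
      rw [hdrop]; rfl
    rw [List.foldl_cons, hface]
    by_cases hc : pc[count.toNat] ≠ -1 ∧ pc[count.toNat] ∉ lst
    · have : faceStepA pc (lst, count, rel, cnt) i
          = (lst ++ [pc[count.toNat]], count + 1,
             lst.foldl (fun r x => bumpA r x pc[count.toNat]) rel,
             cnt.modify (PySem.Int.toStr pc[count.toNat]) 0 (· + 1)) := by
        simp only [faceStepA, hget, if_pos hc.1, if_pos hc.2]
        cases lst with
        | nil => simp
        | cons y ys => simp
      rw [this, hstep]
      simp only [dSpec, if_pos hc, List.length_cons, Nat.cast_add, Nat.cast_one]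
      ring_nf
    · have : faceStepA pc (lst, count, rel, cnt) i = (lst, count + 1, rel, cnt) := by
        simp only [faceStepA, hget]
        by_cases h1 : pc[count.toNat] ≠ -1
        · have h2 : pc[count.toNat] ∈ lst := by tauto
          simp [h1, h2]
        · simp [h1]
      rw [this, hstep]
      simp only [dSpec, if_neg hc, List.length_cons, Nat.cast_add, Nat.cast_one]
      ring_nf

theorem dedupList_prefix (faces : List Int) :
    ∀ pre : List Int, ∃ d, dedupList pre faces = pre ++ d := by
  induction faces with
  | nil => intro pre; exact ⟨[], by simp [dedupList]⟩
  | cons c t ih =>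
    intro pre
    by_cases h : c ≠ -1 ∧ c ∉ pre
    · obtain ⟨d, hd⟩ := ih (pre ++ [c])
      refine ⟨c :: d, ?_⟩
      simp only [dedupList, List.foldl_cons, if_pos h] at hd ⊢
      rw [hd]
      simp
    · obtain ⟨d, hd⟩ := ih pre
      exact ⟨d, by simp only [dedupList, List.foldl_cons, if_neg h] at hd ⊢; exact hd⟩

-- the seen component of B's dedup fold is dedupList, independent of the counter
theorem dedup_snd (faces : List Int) :
    ∀ (cnt : CntD) (pre : List Int), (faces.foldl dedupStepB (cnt, pre)).2 = dedupList pre faces := by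
  induction faces with
  | nil => intro cnt pre; rfl
  | cons c t ih =>
    intro cnt pre
    by_cases h : c ≠ -1 ∧ c ∉ pre
    · simp only [List.foldl_cons, dedupStepB, ih, dedupList, if_pos h]
    · simp only [List.foldl_cons, dedupStepB, ih, dedupList, if_neg h]

-- dSpec splits into the distinct list, the replayed relation updates, and B's counter fold
theorem dSpec_eq (faces : List Int) :
    ∀ (pre : List Int) (rel : RelD) (cnt : CntD),
      dSpec (pre, rel, cnt) faces
        = (dedupList pre faces,
           replayRel rel pre ((dedupList pre faces).drop pre.length),
           (faces.foldl dedupStepB (cnt, pre)).1) := by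
  induction faces with
  | nil => intro pre rel cnt; simp [dSpec, dedupList, replayRel]
  | cons c t ih =>
    intro pre rel cnt
    by_cases h : c ≠ -1 ∧ c ∉ pre
    · simp only [dSpec, List.foldl_cons, dedupStepB, if_pos h, dedupList, ih]
      obtain ⟨d, hd⟩ := dedupList_prefix t (pre ++ [c])
      simp only [dedupList] at hd
      rw [hd]
      have h1 : ((pre ++ [c]) ++ d).drop pre.length = c :: d := by
        rw [List.append_assoc, List.drop_left, List.singleton_append]
      rw [h1, replayRel, List.drop_left]
    · simp only [dSpec, List.foldl_cons, dedupStepB, if_neg h, dedupList, ih]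

-- master lemma: A's main loop = B's pass 1 together with the pending per-image relation replays
theorem master (pc : List Int) (items : List (String × Int)) :
    ∀ (count : Int) (imgs : ImgD) (rel : RelD) (cnt : CntD),
      0 ≤ count → count + totalFaces items ≤ (pc.length : Int) →
      items.foldl (imgStepA pc) (count, imgs, rel, cnt)
        = ((items.foldl (imgStepB pc) (count, imgs, cnt)).1,
           (items.foldl (imgStepB pc) (count, imgs, cnt)).2.1,
           (seensList pc count items).foldl (fun r s => replayRel r [] s) rel,
           (items.foldl (imgStepB pc) (count, imgs, cnt)).2.2) := by
  induction items with
  | nil => intro count imgs rel cnt _ _; simp [seensList]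
  | cons kv t ih =>
    intro count imgs rel cnt h0 hle
    rw [totalFaces_cons] at hle
    have ht0 := totalFaces_nonneg t
    have hm0 : (0:Int) ≤ max kv.2 0 := le_max_right _ _
    have hlen : count.toNat + (PySem.List.pyRange 0 kv.2 1).length ≤ pc.length := by
      rw [PySem.List.length_pyRange_one]; omega
    have hlenq : (PySem.List.pyRange 0 kv.2 1).length = kv.2.toNat := by
      rw [PySem.List.length_pyRange_one]; omega
    have hA : imgStepA pc (count, imgs, rel, cnt) kv
        = (count + max kv.2 0,
           imgs.insert kv.1 (dedupList [] ((pc.drop count.toNat).take kv.2.toNat)),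
           replayRel rel [] (dedupList [] ((pc.drop count.toNat).take kv.2.toNat)),
           ((((pc.drop count.toNat).take kv.2.toNat).foldl dedupStepB (cnt, []))).1) := by
      unfold imgStepA
      rw [faceFold pc _ count [] rel cnt h0 hlen, hlenq]
      rw [dSpec_eq]
      simp only [List.length_nil, List.drop_zero]
      have : count + (kv.2.toNat : Int) = count + max kv.2 0 := by omega
      rw [this]
    have hB : imgStepB pc (count, imgs, cnt) kv
        = (count + max kv.2 0,
           imgs.insert kv.1 (dedupList [] ((pc.drop count.toNat).take kv.2.toNat)),
           ((((pc.drop count.toNat).take kv.2.toNat).foldl dedupStepB (cnt, []))).1) := by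
      simp only [imgStepB]
      have hs : PySem.List.slice pc (some count) (some (count + max kv.2 0))
          = (pc.drop count.toNat).take kv.2.toNat := by
        rw [PySem.List.slice_toNat pc h0 (by omega : (0:Int) ≤ count + max kv.2 0)]
        congr 1
        omega
      rw [hs, dedup_snd]
    rw [List.foldl_cons, List.foldl_cons, hA, hB]
    rw [ih (count + max kv.2 0) _ _ _ (by omega) (by omega)]
    rfl

-- pass 1 stores the per-image lists under fresh keys, so values() lists them in image order
theorem valuesB (pc : List Int) (items : List (String × Int)) :
    ∀ (count : Int) (acc : ImgD) (cnt : CntD),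
      0 ≤ count →
      (∀ kv ∈ items, acc.contains kv.1 = false) →
      (items.map Prod.fst).Nodup →
      (items.foldl (imgStepB pc) (count, acc, cnt)).2.1.values
        = acc.values ++ seensList pc count items := by
  induction items with
  | nil => intro count acc cnt _ _ _; simp [seensList]
  | cons kv t ih =>
    intro count acc cnt h0 hfresh hnd
    have hkv : acc.contains kv.1 = false := hfresh kv (List.mem_cons_self)
    have hstep : imgStepB pc (count, acc, cnt) kv
        = (count + max kv.2 0,
           acc.insert kv.1 (dedupList [] ((pc.drop count.toNat).take kv.2.toNat)),
           ((((pc.drop count.toNat).take kv.2.toNat).foldl dedupStepB (cnt, []))).1) := by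
      simp only [imgStepB]
      have hs : PySem.List.slice pc (some count) (some (count + max kv.2 0))
          = (pc.drop count.toNat).take kv.2.toNat := by
        rw [PySem.List.slice_toNat pc h0 (by positivity : (0:Int) ≤ count + max kv.2 0)]
        congr 1
        omega
      rw [hs, dedup_snd]
    rw [List.foldl_cons, hstep]
    have hm0 : (0:Int) ≤ max kv.2 0 := le_max_right _ _
    have hnd' : (t.map Prod.fst).Nodup := (List.nodup_cons.mp (by simpa using hnd)).2
    have hknot : kv.1 ∉ t.map Prod.fst := (List.nodup_cons.mp (by simpa using hnd)).1
    have hfresh' : ∀ p ∈ t, (acc.insert kv.1 (dedupList [] ((pc.drop count.toNat).take kv.2.toNat))).contains p.1 = false := by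
      intro p hp
      rw [PySem.Dict.contains_insert]
      have h1 : (p.1 == kv.1) = false := by
        apply beq_eq_false_iff_ne.mpr
        intro hpe
        exact hknot (by rw [← hpe]; exact List.mem_map_of_mem hp)
      rw [h1, hfresh p (List.mem_cons_of_mem _ hp)]
      rfl
    rw [ih (count + max kv.2 0) _ _ (by omega) hfresh' hnd']
    have hv : (acc.insert kv.1 (dedupList [] ((pc.drop count.toNat).take kv.2.toNat))).values
        = acc.values ++ [dedupList [] ((pc.drop count.toNat).take kv.2.toNat)] := by
      show ((acc.insert kv.1 _).items.map Prod.snd) = acc.items.map Prod.snd ++ _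
      rw [PySem.Dict.items_insert_of_not_contains _ _ hkv]
      simp
    rw [hv, seensList]
    simp [List.append_assoc]

-- pass 2 over one finished list performs exactly the replayed relation updates
theorem enum_replay (seen : List Int) :
    ∀ (rest pre : List Int) (rel : RelD), pre ++ rest = seen →
      (PySem.List.enumerate rest ((pre.length : Nat) : Int)).foldl
        (fun r jc =>
          (PySem.List.slice seen (some 0) (some jc.1)).foldl (fun r a => bumpA r a jc.2) r) rel
      = replayRel rel pre rest := by
  intro rest
  induction rest with
  | nil => intro pre rel _; simp [PySem.List.enumerate_nil, replayRel]
  | cons c t ih =>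
    intro pre rel hpre
    rw [PySem.List.enumerate_cons]
    rw [List.foldl_cons]
    have htake : PySem.List.slice seen (some 0) (some ((pre.length : Nat) : Int)) = pre := by
      rw [PySem.List.slice_zero_start, PySem.List.slice_to _ (by positivity)]
      rw [Int.toNat_natCast, ← hpre, List.take_left]
    rw [htake]
    have hcast : ((pre.length : Nat) : Int) + 1 = (((pre ++ [c]).length : Nat) : Int) := by
      simp
    rw [hcast, ih (pre ++ [c]) _ (by rw [← hpre, List.append_assoc]; rfl)]
    rfl

theorem imgRelB_eq (rel : RelD) (seen : List Int) : imgRelB rel seen = replayRel rel [] seen := by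
  have h := enum_replay seen seen [] rel rfl
  simpa [imgRelB] using h

-- ===== VERDICT (by name: the statement is the Claim_ definition above) =====
theorem clusterRelation_spec : Claim_equal_clusterRelation := by
  intro ins ifc pc _ hpre
  obtain ⟨hnd, hle, _⟩ := hpre
  simp only [Spec_clusterRelation, clusterRelation, clusterRelation_alt]
  rw [initEq]
  dsimp only
  rw [master pc ifc 0 PySem.Dict.empty (initRelB ins) (initCntB ins) le_rfl (by simpa using hle)]
  have hval : (ifc.foldl (imgStepB pc) (0, PySem.Dict.empty, initCntB ins)).2.1.values
      = seensList pc 0 ifc := by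
    rw [valuesB pc ifc 0 PySem.Dict.empty (initCntB ins) le_rfl
        (fun kv _ => PySem.Dict.contains_empty kv.1) hnd]
    show (PySem.Dict.empty.items.map Prod.snd) ++ _ = _
    simp [PySem.Dict.empty]
  rw [hval]
  have hfold : (seensList pc 0 ifc).foldl imgRelB (initRelB ins)
      = (seensList pc 0 ifc).foldl (fun r s => replayRel r [] s) (initRelB ins) := by
    have : imgRelB = fun r s => replayRel r [] s := funext fun r => funext fun s => imgRelB_eq r s
    rw [this]
  rw [hfold]
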